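-- pv_equiv track=rewrite | github.com/AlainWafflard/4IPO3 | 21-GUI/exo/21-03-03-convertisseur_adresseIP.py | convertIPaddress10to2
-- ===== SOURCE A (Python) =====
-- def convert10to2( dec ):
--     """ convertit un nombre décimal en binaire
--         param nombre décimal
--         return nombre binaire
--     """
--     if dec > 255 or dec < 0 :
--         return False
--     bin_l = []
--
--     for i in [ 128, 64, 32, 16, 8, 4, 2, 1 ]:
--         if dec >= i :
--             bin_l.append("1")
--             dec = dec - i
--         else:
--             bin_l.append("0")
--     bin_s = "".join(bin_l)
--
--     return bin_s
--
-- def convertIPaddress10to2( ip_address ):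
--     """ convertit une adresse IP (4) en binaire
--         param string 193.294.129.7
--         return string 11001100.10101010.00001111.0000001
--     """
--     ip_l = ip_address.split(".")
--     ip_bin_l = []
--     for ip in ip_l:
--         bin = convert10to2(int(ip))
--         ip_bin_l.append(bin)
--     ip_bin_s = ".".join(ip_bin_l)
--     return ip_bin_s
-- ===== SOURCE B (Python) =====
-- def convertIPaddress10to2(ip_address):
--     return ".".join(format(int(ip), "b").zfill(8) for ip in ip_address.split("."))
-- ===== Notes on version B (the rewrite author's own statement) =====
-- stated objective: idiomatic
-- what changed: Replaces the per-octet greedy power-of-two subtraction loop with list accumulator (and its False channel for out-of-range octets) by a one-line join over a generator using format(int(ip),'b').zfill(8).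
import Mathlib
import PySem

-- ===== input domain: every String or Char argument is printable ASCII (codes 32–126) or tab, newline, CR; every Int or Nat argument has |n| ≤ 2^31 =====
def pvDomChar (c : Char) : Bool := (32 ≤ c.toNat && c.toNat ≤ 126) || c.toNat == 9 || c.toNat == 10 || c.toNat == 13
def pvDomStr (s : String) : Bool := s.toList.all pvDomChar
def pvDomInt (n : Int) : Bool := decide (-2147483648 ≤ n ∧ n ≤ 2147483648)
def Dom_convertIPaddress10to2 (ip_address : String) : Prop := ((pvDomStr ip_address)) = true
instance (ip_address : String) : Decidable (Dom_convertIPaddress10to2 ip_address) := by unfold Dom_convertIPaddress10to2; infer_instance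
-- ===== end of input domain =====

-- B replaces A's greedy power-of-two subtraction loop by an idiomatic join over format(int(ip),'b').zfill(8).

-- ===== PORT A =====
-- convert10to2: none = Python's False (a non-string, which makes the later ".".join raise TypeError)
def convert10to2 (dec : Int) : Option String :=
  if dec > 255 || dec < 0 then none
  else
    let r := [(128:Int), 64, 32, 16, 8, 4, 2, 1].foldl
      (fun (st : List String × Int) i =>
        if st.2 ≥ i then (st.1 ++ ["1"], st.2 - i) else (st.1 ++ ["0"], st.2)) ([], dec)
    some (PySem.Str.join "" r.1)

def convertIPaddress10to2 (ip_address : String) : String :=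
  let ip_l := (PySem.Str.split? ip_address ".").getD []
  let ip_bin_l : List (Option String) :=
    ip_l.foldl (fun acc ip => acc ++ [(PySem.Int.ofStr? ip).bind convert10to2]) []
  -- int(ip) raising ValueError, and ".".join raising TypeError on a False entry, are the
  -- 'none' cases below; Pre_ excludes exactly those inputs (A raises, returns no String).
  if ip_bin_l.all Option.isSome then PySem.Str.join "." (ip_bin_l.map (fun o => o.getD "")) else ""

-- ===== PORT B =====
def convertIPaddress10to2_alt (ip_address : String) : String :=
  -- (….getD 0): int(ip) raises ValueError on a non-numeric octet; those inputs are outside Pre_.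
  PySem.Str.join "." (((PySem.Str.split? ip_address ".").getD []).map
    (fun p => PySem.Str.zfill (PySem.Int.toBin ((PySem.Int.ofStr? p).getD 0)) 8))

-- ===== PRECONDITION & SPEC =====
-- Pre_ excludes exactly the inputs on which A raises: an octet int() cannot parse (ValueError),
-- or an octet outside 0..255 (convert10to2 returns False and ".".join raises TypeError).
def Pre_convertIPaddress10to2 (ip_address : String) : Prop :=
  (((PySem.Str.split? ip_address ".").getD []).all
    (fun p => match PySem.Int.ofStr? p with
      | some n => decide (0 ≤ n ∧ n ≤ 255)
      | none => false)) = true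
instance (ip_address : String) : Decidable (Pre_convertIPaddress10to2 ip_address) := by
  unfold Pre_convertIPaddress10to2; infer_instance

def pvWitness_convertIPaddress10to2 : String := "193.254.129.7"

def Spec_convertIPaddress10to2 (ip_address : String) (out : String) : Prop :=
  out = convertIPaddress10to2_alt ip_address
instance (ip_address : String) (out : String) : Decidable (Spec_convertIPaddress10to2 ip_address out) := by
  unfold Spec_convertIPaddress10to2; infer_instance

-- ===== CLAIM =====
def Claim_equal_convertIPaddress10to2 : Prop := ∀ (ip_address : String), Dom_convertIPaddress10to2 ip_address → Pre_convertIPaddress10to2 ip_address → Spec_convertIPaddress10to2 ip_address (convertIPaddress10to2 ip_address)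

-- ===== LEMMAS AND PROOFS =====
lemma foldl_app_map {α β : Type} (l : List α) (f : α → β) (acc : List β) :
    l.foldl (fun acc x => acc ++ [f x]) acc = acc ++ l.map f := by
  induction l generalizing acc with
  | nil => simp
  | cons x xs ih => simp [List.foldl, ih]

set_option maxRecDepth 4000 in
lemma key_octet : ∀ m : Nat, m < 256 →
    convert10to2 (m : Int) = some (PySem.Str.zfill (PySem.Int.toBin (m : Int)) 8) := by decide

theorem convertIPaddress10to2_spec : Claim_equal_convertIPaddress10to2 := by
  intro ip _ hpre
  unfold Spec_convertIPaddress10to2 convertIPaddress10to2 convertIPaddress10to2_alt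
  unfold Pre_convertIPaddress10to2 at hpre
  rw [List.all_eq_true] at hpre
  simp only [foldl_app_map, List.nil_append]
  have helem : ∀ p ∈ (PySem.Str.split? ip ".").getD [],
      (PySem.Int.ofStr? p).bind convert10to2 =
        some (PySem.Str.zfill (PySem.Int.toBin ((PySem.Int.ofStr? p).getD 0)) 8) := by
    intro p hp
    have h := hpre p hp
    cases hn : PySem.Int.ofStr? p with
    | none => simp [hn] at h
    | some n =>
      rw [hn] at h
      simp only [decide_eq_true_eq] at h
      have hnn : n = ((n.toNat : Int)) := by omega
      have hlt : n.toNat < 256 := by omega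
      simp only [Option.bind_some, Option.getD_some]
      rw [hnn]
      exact key_octet n.toNat hlt
  have hmap : ((PySem.Str.split? ip ".").getD []).map (fun p => (PySem.Int.ofStr? p).bind convert10to2)
      = ((PySem.Str.split? ip ".").getD []).map
        (fun p => some (PySem.Str.zfill (PySem.Int.toBin ((PySem.Int.ofStr? p).getD 0)) 8)) :=
    List.map_congr_left helem
  rw [hmap]
  simp [List.all_eq_true, List.map_map, Function.comp_def]
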